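-- pv_equiv track=rewrite | github.com/Bima42/docstral | server/scraper/scraper.py | _has_code
-- ===== SOURCE A (Python) =====
-- def _has_code(content: str) -> bool:
--     """Detect if content contains code blocks"""
--     code_indicators = [
--         "```",
--         "import ",
--         "def ",
--         "const ",
--         "function ",
--         "curl ",
--         "class ",
--     ]
--     return any(indicator in content for indicator in code_indicators)
-- ===== SOURCE B (Python) =====
-- def _has_code(content: str) -> bool:
--     """Detect if content contains code blocks: one left-to-right scan over the
--     suffixes of content, checking at each position whether an indicator starts there."""
--     indicators = [
--         "```",
--         "import ",
--         "def ",
--         "const ",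
--         "function ",
--         "curl ",
--         "class ",
--     ]
--     s = content
--     while s:
--         if any(s.startswith(ind) for ind in indicators):
--             return True
--         s = s[1:]
--     return False
-- ===== Notes on version B (the rewrite author's own statement) =====
-- stated objective: alternative
-- what changed: Replaces the sequence of independent per-indicator substring scans with a single left-to-right scan over the suffixes of content, testing at each position whether some indicator is a prefix there.
import Mathlib
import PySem

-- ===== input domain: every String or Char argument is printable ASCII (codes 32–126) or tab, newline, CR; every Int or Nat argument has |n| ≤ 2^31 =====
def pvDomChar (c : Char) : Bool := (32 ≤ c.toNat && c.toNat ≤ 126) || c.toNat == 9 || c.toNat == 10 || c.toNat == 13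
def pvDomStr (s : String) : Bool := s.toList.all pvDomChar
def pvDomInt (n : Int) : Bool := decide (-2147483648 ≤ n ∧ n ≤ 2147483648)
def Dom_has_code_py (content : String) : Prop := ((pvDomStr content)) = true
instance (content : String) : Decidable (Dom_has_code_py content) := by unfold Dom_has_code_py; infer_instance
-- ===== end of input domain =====

-- B replaces A's sequence of independent substring scans by a single left-to-right
-- scan over the suffixes of content (alternative decomposition, same results).


-- ===== PORT A =====
-- any(indicator in content for indicator in code_indicators)
def has_code_py (content : String) : Bool :=
  (["```", "import ", "def ", "const ", "function ", "curl ", "class "] : List String).any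
    (fun indicator => PySem.Str.isIn indicator content)

-- ===== PORT B =====
def hcIndicators : List (List Char) :=
  ["```".toList, "import ".toList, "def ".toList, "const ".toList,
   "function ".toList, "curl ".toList, "class ".toList]

-- the `while s:` loop of Source B: test the indicators at the current suffix, then drop one char
def hcScan : List Char → Bool
  | [] => false
  | c :: rest =>
    hcIndicators.any (fun ind => PySem.Chars.startswith (c :: rest) ind) || hcScan rest

def has_code_py_alt (content : String) : Bool := hcScan content.toList

-- ===== PRECONDITION & SPEC =====
def Spec_has_code_py (content : String) (out : Bool) : Prop := out = has_code_py_alt content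
instance (content : String) (out : Bool) : Decidable (Spec_has_code_py content out) := by unfold Spec_has_code_py; infer_instance

-- ===== CLAIM (what is proved, stated in full; the proofs are below) =====
def Claim_equal_has_code_py : Prop := ∀ (content : String), Dom_has_code_py content → Spec_has_code_py content (has_code_py content)

-- ===== LEMMAS AND PROOFS =====

theorem hcIndicators_ne_nil : ∀ ind ∈ hcIndicators, ind ≠ [] := by decide

theorem hcScan_iff (cs : List Char) :
    hcScan cs = true ↔ ∃ ind ∈ hcIndicators, ind <:+: cs := by
  induction cs with
  | nil =>
    simp only [hcScan, Bool.false_eq_true, false_iff]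
    rintro ⟨ind, hmem, hinf⟩
    exact hcIndicators_ne_nil ind hmem (List.eq_nil_of_infix_nil hinf)
  | cons c rest ih =>
    simp only [hcScan, Bool.or_eq_true, List.any_eq_true, PySem.Chars.startswith_iff, ih]
    constructor
    · rintro (⟨ind, hmem, hpre⟩ | ⟨ind, hmem, hinf⟩)
      · exact ⟨ind, hmem, hpre.isInfix⟩
      · exact ⟨ind, hmem, hinf.trans (List.suffix_cons c rest).isInfix⟩
    · rintro ⟨ind, hmem, hinf⟩
      rcases List.infix_cons_iff.mp hinf with hpre | hinf'
      · exact Or.inl ⟨ind, hmem, hpre⟩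
      · exact Or.inr ⟨ind, hmem, hinf'⟩

theorem has_code_py_eq (content : String) : has_code_py content = has_code_py_alt content := by
  rw [Bool.eq_iff_iff]
  simp only [has_code_py, has_code_py_alt, List.any_eq_true, PySem.Str.isIn_iff_infix,
    hcScan_iff]
  constructor
  · rintro ⟨s, hmem, hinf⟩
    refine ⟨s.toList, ?_, hinf⟩
    fin_cases hmem <;> simp [hcIndicators]
  · rintro ⟨ind, hmem, hinf⟩
    fin_cases hmem <;> exact ⟨_, by simp, hinf⟩

-- ===== VERDICT (by name: the statement is the Claim_ definition above) =====
theorem has_code_py_spec : Claim_equal_has_code_py := by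
  intro content _
  exact has_code_py_eq content
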